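-- pv_equiv track=rewrite | github.com/JayC319/IC_Design_Laboratory--Digital-Signature-Authenticator | software/sha3_util.py | txt_to_hex
-- ===== SOURCE A (Python) =====
-- def txt_to_hex(S_txt):
--     token = ''
--     lst = list(S_txt)
--     asc = [ord(char) for char in lst]
--     binary = [token.join(list(format(a, '08b')[::-1])) for a in asc]
--     hexidecimal = [hex(int(b, 2))[2:] for b in binary]
--     hexidecimal = token.join(hexidecimal)
--
--     return hexidecimal
-- ===== SOURCE B (Python) =====
-- def txt_to_hex(S_txt):
--     out = []
--     for ch in S_txt:
--         a = ord(ch)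
--         r = 0
--         for i in range(8):
--             r = (r << 1) | ((a >> i) & 1)
--         out.append(format(r, 'x'))
--     return ''.join(out)
-- ===== Notes on version B (the rewrite author's own statement) =====
-- stated objective: alternative
-- what changed: B reverses each character's 8 bits by pure integer shift/mask arithmetic in a single loop and formats the result as hex directly, instead of A's pipeline of binary-string formatting, string-slice reversal and re-parsing with int(b, 2).
import Mathlib
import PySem

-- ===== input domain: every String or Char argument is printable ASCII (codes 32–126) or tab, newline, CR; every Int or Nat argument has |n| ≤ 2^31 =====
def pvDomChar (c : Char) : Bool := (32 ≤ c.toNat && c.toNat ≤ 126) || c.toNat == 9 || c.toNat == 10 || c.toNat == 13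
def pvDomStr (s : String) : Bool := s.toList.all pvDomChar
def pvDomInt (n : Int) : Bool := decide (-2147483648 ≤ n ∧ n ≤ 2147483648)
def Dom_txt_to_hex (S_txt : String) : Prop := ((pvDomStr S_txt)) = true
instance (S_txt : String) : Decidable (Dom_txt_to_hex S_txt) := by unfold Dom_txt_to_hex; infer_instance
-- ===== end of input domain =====

-- B reverses each character's 8 bits by integer shift/mask arithmetic instead of
-- A's binary-string formatting, slice reversal and re-parsing; same result, same cost.


-- hex digit / hex string of a nonnegative number, lowercase, no prefix:
-- shared helper = Python's format(r, 'x') and hex(n)[2:] (both sides use it)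
def pvHexDigit (n : Nat) : Char := if n < 10 then Char.ofNat (48 + n) else Char.ofNat (87 + n)

-- fuel-style structural recursion (fuel n+1 always suffices) so the kernel can evaluate it
def pvHexCharsAux : Nat → Nat → List Char
  | 0, _ => []
  | fuel + 1, n => if n = 0 then [] else pvHexCharsAux fuel (n / 16) ++ [pvHexDigit (n % 16)]

def pvHexChars (n : Nat) : List Char := if n = 0 then ['0'] else pvHexCharsAux (n + 1) n

-- ===== PORT A =====
-- format(a,'08b') for a ≥ 0: binary digits left-padded with '0' to width 8
def pvFmt08b (a : Int) : List Char :=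
  let bs := PySem.Int.toBinChars a
  List.replicate (8 - bs.length) '0' ++ bs

-- per-character token of A: hex(int(format(a,'08b')[::-1], 2))[2:]
-- (int(b, 2) never raises here: b consists of '0'/'1' only, so the none branch is unreachable)
def pvTokA (a : Int) : List Char :=
  match PySem.Int.ofCharsBase? (pvFmt08b a).reverse 2 with
  | some v => pvHexChars v.toNat
  | none => []

def txt_to_hex (S_txt : String) : String :=
  let lst := S_txt.toList
  let asc := lst.map (fun c => (c.toNat : Int))
  let hexidecimal := asc.map pvTokA
  String.ofList hexidecimal.flatten

-- ===== PORT B =====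
-- r = 0; for i in range(8): r = (r << 1) | ((a >> i) & 1)
def pvRevBits8 (a : Nat) : Nat :=
  (List.range 8).foldl (fun r i => (r <<< 1) ||| ((a >>> i) &&& 1)) 0

def pvTokB (c : Char) : List Char := pvHexChars (pvRevBits8 c.toNat)

def txt_to_hex_alt (S_txt : String) : String :=
  String.ofList (S_txt.toList.map pvTokB).flatten

-- ===== PRECONDITION & SPEC =====
def Spec_txt_to_hex (S_txt : String) (out : String) : Prop := out = txt_to_hex_alt S_txt
instance (S_txt : String) (out : String) : Decidable (Spec_txt_to_hex S_txt out) := by unfold Spec_txt_to_hex; infer_instance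

-- ===== CLAIM (what is proved, stated in full; the proofs are below) =====
def Claim_equal_txt_to_hex : Prop := ∀ (S_txt : String), Dom_txt_to_hex S_txt → Spec_txt_to_hex S_txt (txt_to_hex S_txt)

-- ===== LEMMAS AND PROOFS =====
-- the two per-character tokens agree on every code point of the domain (checked exhaustively)
theorem tok_eq : ∀ n : Nat, n < 127 → pvTokA (n : Int) = pvHexChars (pvRevBits8 n) := by decide

theorem domChar_lt (c : Char) (h : pvDomChar c = true) : c.toNat < 127 := by
  simp [pvDomChar] at h; omega

-- ===== VERDICT (by name: the statement is the Claim_ definition above) =====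
theorem txt_to_hex_spec : Claim_equal_txt_to_hex := by
  intro S hdom
  unfold Spec_txt_to_hex txt_to_hex txt_to_hex_alt
  simp only [List.map_map]
  have hmap : List.map (pvTokA ∘ fun c => ((c.toNat : Int))) S.toList = List.map pvTokB S.toList := by
    apply List.map_congr_left
    intro c hc
    have hd : pvDomChar c = true := by
      have := hdom
      unfold Dom_txt_to_hex pvDomStr at this
      exact (List.all_eq_true.mp this) c hc
    show pvTokA ((c.toNat : Int)) = pvTokB c
    exact tok_eq c.toNat (domChar_lt c hd)
  rw [hmap]
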